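-- pv_equiv track=rewrite | github.com/mecchih/Projeto2-Henrique-Certo | funcoes.py | calcula_pontos_quadra
-- ===== SOURCE A (Python) =====
-- def calcula_pontos_quadra(lista_inteiros):
--     quadra = []
--     for numero in lista_inteiros:
--         contagem = 0
--         for i in range(len(lista_inteiros)):
--             if lista_inteiros[i] == numero:
--                 contagem += 1
--         if contagem >= 4:
--             quadra.append(numero)
--     if len(quadra) == 0:
--         return 0
--     else:
--         soma = 0
--         for i in lista_inteiros:
--             soma += i
--     return soma
-- ===== SOURCE B (Python) =====
-- def calcula_pontos_quadra(lista_inteiros):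
--     contagens = {}
--     for numero in lista_inteiros:
--         contagens[numero] = contagens.get(numero, 0) + 1
--     if any(c >= 4 for c in contagens.values()):
--         return sum(lista_inteiros)
--     return 0
-- ===== Notes on version B (the rewrite author's own statement) =====
-- stated objective: faster
-- what changed: Replaces the quadratic per-element recount (inner scan over the whole list for every element) with a single counting pass into a dict, then checks the counts once.
import Mathlib
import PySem

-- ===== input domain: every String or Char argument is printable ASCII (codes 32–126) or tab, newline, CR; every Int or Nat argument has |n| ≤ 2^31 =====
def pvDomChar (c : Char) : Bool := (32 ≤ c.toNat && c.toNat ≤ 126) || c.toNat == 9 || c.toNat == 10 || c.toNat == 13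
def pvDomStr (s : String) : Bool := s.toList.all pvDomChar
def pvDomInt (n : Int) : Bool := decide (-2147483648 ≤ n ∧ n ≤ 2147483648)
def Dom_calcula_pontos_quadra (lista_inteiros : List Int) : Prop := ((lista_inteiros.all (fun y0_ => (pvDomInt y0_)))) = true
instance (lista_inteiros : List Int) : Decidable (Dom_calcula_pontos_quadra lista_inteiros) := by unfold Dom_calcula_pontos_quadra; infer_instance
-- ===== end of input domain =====

-- B replaces A's quadratic per-element recount with one counting pass into a dict; return value only.

-- ===== PORT A =====
def calcula_pontos_quadra (lista_inteiros : List Int) : Int :=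
  let quadra : List Int := lista_inteiros.foldl (fun quadra numero =>
    let contagem : Int := (PySem.List.pyRange 0 lista_inteiros.length 1).foldl
      (fun contagem i => if PySem.List.pyGetD lista_inteiros i 0 == numero then contagem + 1 else contagem) 0
    if contagem ≥ 4 then quadra ++ [numero] else quadra) []
  if quadra.length = 0 then 0
  else lista_inteiros.foldl (fun soma i => soma + i) 0

-- ===== PORT B =====
def calcula_pontos_quadra_alt (lista_inteiros : List Int) : Int :=
  let contagens : PySem.Dict Int Int :=
    lista_inteiros.foldl (fun d numero => d.insert numero (d.getD numero 0 + 1)) PySem.Dict.empty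
  if contagens.values.any (fun c => c ≥ 4) then lista_inteiros.sum else 0

-- ===== PRECONDITION & SPEC =====
def Spec_calcula_pontos_quadra (lista_inteiros : List Int) (out : Int) : Prop := out = calcula_pontos_quadra_alt lista_inteiros
instance (lista_inteiros : List Int) (out : Int) : Decidable (Spec_calcula_pontos_quadra lista_inteiros out) := by unfold Spec_calcula_pontos_quadra; infer_instance

-- ===== CLAIM (what is proved, stated in full; the proofs are below) =====
def Claim_equal_calcula_pontos_quadra : Prop := ∀ (lista_inteiros : List Int), Dom_calcula_pontos_quadra lista_inteiros → Spec_calcula_pontos_quadra lista_inteiros (calcula_pontos_quadra lista_inteiros)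

-- ===== LEMMAS AND PROOFS =====

-- A's inner loop computes the multiplicity of numero in l.
lemma contagem_eq_count (l : List Int) (numero : Int) :
    (PySem.List.pyRange 0 (l.length : Int) 1).foldl
      (fun contagem i => if PySem.List.pyGetD l i 0 == numero then contagem + 1 else contagem) (0 : Int)
    = (l.count numero : Int) := by
  rw [PySem.List.foldl_pyRange_zero_pyGetD' l (0 : Int)
    (fun contagem x => if x == numero then contagem + 1 else contagem) 0]
  rw [PySem.List.foldl_count_if (fun x => x == numero) l 0]
  simp [List.count]

-- A's quadra is the filter of elements occurring >= 4 times.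
lemma quadra_eq_filter (l : List Int) :
    l.foldl (fun quadra numero =>
      let contagem : Int := (PySem.List.pyRange 0 l.length 1).foldl
        (fun contagem i => if PySem.List.pyGetD l i 0 == numero then contagem + 1 else contagem) 0
      if contagem ≥ 4 then quadra ++ [numero] else quadra) [] =
    l.filter (fun numero => 4 ≤ (l.count numero : Int)) := by
  have step : (fun (quadra : List Int) (numero : Int) =>
      let contagem : Int := (PySem.List.pyRange 0 l.length 1).foldl
        (fun contagem i => if PySem.List.pyGetD l i 0 == numero then contagem + 1 else contagem) 0
      if contagem ≥ 4 then quadra ++ [numero] else quadra)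
    = (fun quadra numero => if 4 ≤ (l.count numero : Int) then quadra ++ [numero] else quadra) := by
    funext quadra numero
    simp only [contagem_eq_count l numero, ge_iff_le]
  rw [step, PySem.List.foldl_append_ite_eq_filter (fun numero => 4 ≤ (l.count numero : Int)) l []]
  simp

-- B's condition equals "some element occurs >= 4 times".
lemma values_any_iff (l : List Int) :
    (((l.foldl (fun d numero => d.insert numero (d.getD numero 0 + 1)) PySem.Dict.empty
        : PySem.Dict Int Int)).values.any (fun c => c ≥ 4) = true)
      ↔ ∃ x ∈ l, 4 ≤ (l.count x : Int) := by
  rw [PySem.Dict.foldl_insert_getD_add_one_eq_counter]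
  have hv : (PySem.Dict.counter l).values
      = List.map (fun k => ((l.count k : Int))) (PySem.Set.ofList l) := by
    show (PySem.Dict.counter l).items.map (·.2) = _
    rw [PySem.Dict.items_counter]
    simp
  rw [hv]
  simp only [List.any_eq_true, List.mem_map]
  constructor
  · rintro ⟨c, ⟨k, hk, rfl⟩, hge⟩
    exact ⟨k, (PySem.Set.mem_ofList _ _).mp hk, by simpa [ge_iff_le] using hge⟩
  · rintro ⟨x, hx, hcx⟩
    exact ⟨(l.count x : Int), ⟨x, (PySem.Set.mem_ofList _ _).mpr hx, rfl⟩, by simpa [ge_iff_le] using hcx⟩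

-- ===== VERDICT (by name: the statement is the Claim_ definition above) =====
theorem calcula_pontos_quadra_spec : Claim_equal_calcula_pontos_quadra := by
  intro l _
  show calcula_pontos_quadra l = calcula_pontos_quadra_alt l
  unfold calcula_pontos_quadra calcula_pontos_quadra_alt
  simp only [quadra_eq_filter]
  have hsum : l.foldl (fun soma i => soma + i) 0 = l.sum := by
    simpa using PySem.List.foldl_add (g := fun x : Int => x) (l := l) (a := 0)
  by_cases h : ∃ x ∈ l, 4 ≤ (l.count x : Int)
  · have hB := (values_any_iff l).mpr h
    have hA : ¬ (l.filter (fun numero => 4 ≤ (l.count numero : Int))).length = 0 := by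
      obtain ⟨x, hx, hcx⟩ := h
      intro hlen
      rw [List.length_eq_zero_iff, List.filter_eq_nil_iff] at hlen
      have := hlen x hx
      simp only [decide_eq_true_eq] at this
      exact this hcx
    rw [if_neg hA, if_pos hB, hsum]
  · have hB : ¬ (((l.foldl (fun d numero => d.insert numero (d.getD numero 0 + 1)) PySem.Dict.empty
        : PySem.Dict Int Int)).values.any (fun c => c ≥ 4) = true) := fun hb => h ((values_any_iff l).mp hb)
    have hA : (l.filter (fun numero => 4 ≤ (l.count numero : Int))).length = 0 := by
      rw [List.length_eq_zero_iff, List.filter_eq_nil_iff]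
      intro x hx
      simp only [decide_eq_true_eq]
      exact fun hc => h ⟨x, hx, hc⟩
    rw [if_pos hA, if_neg hB]
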